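-- pv_equiv track=rewrite | github.com/LaLaLaOpera/Python-coding-practice | 프로그래머스 스코빌.py | solution
-- ===== SOURCE A (Python) =====
-- import heapq
--
-- def solution(scoville, K):
--     heap = []
--     for i in scoville:
--         heapq.heappush(heap, i)
--     answer =0
--     while True:
--         if len(heap) <= 1:
--             return -1
--         else:
--             answer +=1
--             newNum = heapq.heappop(heap)+heapq.heappop(heap)*2
--             heapq.heappush(heap,newNum)
--             if heap[0]>=K:
--                 return answer
-- ===== SOURCE B (Python) =====
-- def _pop_min(xs):
--     # remove and return the first minimal element of the non-empty list xs
--     idx = 0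
--     for i in range(1, len(xs)):
--         if xs[i] < xs[idx]:
--             idx = i
--     return xs.pop(idx)
--
--
-- def _smallest(xs):
--     m = xs[0]
--     for v in xs:
--         if v < m:
--             m = v
--     return m
--
--
-- def solution(scoville, K):
--     xs = list(scoville)
--     answer = 0
--     while len(xs) >= 2:
--         answer += 1
--         a = _pop_min(xs)
--         b = _pop_min(xs)
--         xs.append(a + 2 * b)
--         if _smallest(xs) >= K:
--             return answer
--     return -1
-- ===== Notes on version B (the rewrite author's own statement) =====
-- stated objective: alternative
-- what changed: Replaces the binary heap with a plain list processed by linear scans: pop the first minimum twice, append the mix, and rescan for the minimum for the K-check; heapq disappears entirely.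
import Mathlib
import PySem

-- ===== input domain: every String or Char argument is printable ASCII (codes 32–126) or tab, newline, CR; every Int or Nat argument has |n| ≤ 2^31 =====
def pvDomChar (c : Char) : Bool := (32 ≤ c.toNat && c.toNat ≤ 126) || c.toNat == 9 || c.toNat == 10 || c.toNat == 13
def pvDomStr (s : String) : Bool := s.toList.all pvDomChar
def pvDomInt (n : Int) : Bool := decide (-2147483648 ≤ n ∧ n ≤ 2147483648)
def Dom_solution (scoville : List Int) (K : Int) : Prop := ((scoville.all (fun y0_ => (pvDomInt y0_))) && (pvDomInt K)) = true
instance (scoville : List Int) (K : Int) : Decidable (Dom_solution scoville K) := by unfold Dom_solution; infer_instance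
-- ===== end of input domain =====

-- B replaces A's heapq min-heap by a plain list with linear first-minimum scans (pop-min twice,
-- append the mix, rescan for the K-check): a different data representation, not faster (objective: alternative).

-- ===== PORT A =====
-- A uses the heapq library. PySem has no heapq, so the library's priority queue is modelled by its
-- contract: the heap list is represented in sorted order, heappush inserts in order, heappop removes
-- the head (the minimum) and heap[0] is the head. This is exact for every observation A makes of the
-- heap (heappop results, heap[0], len(heap)).
def heapPush (x : Int) : List Int → List Int
  | [] => [x]
  | y :: ys => if x ≤ y then x :: y :: ys else y :: heapPush x ys

theorem heapPush_length (x : Int) (l : List Int) : (heapPush x l).length = l.length + 1 := by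
  induction l with
  | nil => rfl
  | cons y ys ih => simp only [heapPush]; split <;> simp [ih]

-- the 'while True' loop of A; each pass pops two, pushes one (length ≤ 1 → return -1)
def heapLoop : List Int → Int → Int → Int
  | [], _, _ => -1
  | [_], _, _ => -1
  | a :: b :: rest, K, answer =>
      let h := heapPush (a + b * 2) rest
      -- heap[0]: h is non-empty by construction, headI is exact here
      if h.headI ≥ K then answer + 1
      else heapLoop h K (answer + 1)
termination_by h _ _ => h.length
decreasing_by simp [heapPush_length]

def solution (scoville : List Int) (K : Int) : Int :=
  heapLoop (scoville.foldl (fun h i => heapPush i h) []) K 0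

-- ===== PORT B =====
-- _pop_min: scan for the first minimal element and pop it (structural recursion over the scan)
def popMin : List Int → Int × List Int
  | [] => (0, [])          -- unreachable: callers pass non-empty lists
  | [x] => (x, [])
  | x :: y :: ys =>
      let p := popMin (y :: ys)
      if x ≤ p.1 then (x, y :: ys) else (p.1, x :: p.2)

theorem popMin_len (l : List Int) (h : l ≠ []) : (popMin l).2.length + 1 = l.length := by
  induction l with
  | nil => simp at h
  | cons x t ih =>
    cases t with
    | nil => rfl
    | cons y ys =>
      have := ih (by simp)
      simp only [popMin] at this ⊢
      split <;> simp_all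

-- the loop body shrinks the list by exactly one element (cited in altLoop's decreasing_by)
theorem altLoop_dec (x y : Int) (t : List Int) (v : Int) :
    ((popMin (popMin (x :: y :: t)).2).2 ++ [v]).length < (x :: y :: t).length := by
  have h1 := popMin_len (x :: y :: t) (by simp)
  simp only [List.length_cons] at h1
  have h2 := popMin_len ((popMin (x :: y :: t)).2)
    (List.ne_nil_of_length_pos (by omega))
  simp only [List.length_append, List.length_cons, List.length_nil]
  omega

-- _smallest: running minimum over the whole list, seeded with xs[0]
def smallest : List Int → Int
  | [] => 0                -- unreachable: callers pass non-empty lists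
  | x :: t => (x :: t).foldl (fun m v => if v < m then v else m) x

def altLoop : List Int → Int → Int → Int
  | [], _, _ => -1
  | [_], _, _ => -1
  | x :: y :: t, K, answer =>
      let p := popMin (x :: y :: t)
      let q := popMin p.2
      let xs3 := q.2 ++ [p.1 + 2 * q.1]
      if smallest xs3 ≥ K then answer + 1
      else altLoop xs3 K (answer + 1)
termination_by xs _ _ => xs.length
decreasing_by
  exact altLoop_dec _ _ _ _

def solution_alt (scoville : List Int) (K : Int) : Int :=
  altLoop scoville K 0

-- ===== PRECONDITION & SPEC =====
def Spec_solution (scoville : List Int) (K : Int) (out : Int) : Prop := out = solution_alt scoville K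
instance (scoville : List Int) (K : Int) (out : Int) : Decidable (Spec_solution scoville K out) := by unfold Spec_solution; infer_instance

-- ===== CLAIM (what is proved, stated in full; the proofs are below) =====
def Claim_equal_solution : Prop := ∀ (scoville : List Int) (K : Int), Dom_solution scoville K → Spec_solution scoville K (solution scoville K)

-- ===== LEMMAS AND PROOFS =====

theorem heapPush_perm (x : Int) (l : List Int) : (heapPush x l).Perm (x :: l) := by
  induction l with
  | nil => rfl
  | cons y ys ih =>
      simp only [heapPush]
      split
      · exact List.Perm.refl _
      · exact (List.Perm.cons y ih).trans (List.Perm.swap x y ys)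

theorem heapPush_sorted (x : Int) (l : List Int) (h : l.Pairwise (· ≤ ·)) :
    (heapPush x l).Pairwise (· ≤ ·) := by
  induction l with
  | nil => simp [heapPush]
  | cons y ys ih =>
      rcases List.pairwise_cons.mp h with ⟨hy, hys⟩
      simp only [heapPush]
      split
      · rename_i hxy
        refine List.pairwise_cons.mpr ⟨?_, h⟩
        intro z hz
        rcases List.mem_cons.mp hz with rfl | hz
        · exact hxy
        · exact le_trans hxy (hy z hz)
      · rename_i hxy
        refine List.pairwise_cons.mpr ⟨?_, ih hys⟩
        intro z hz
        rcases List.mem_cons.mp ((heapPush_perm x ys).mem_iff.mp hz) with rfl | hz2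
        · omega
        · exact hy z hz2

theorem foldl_min_perm {l l' : List Int} (h : l.Perm l') (a : Int) :
    l.foldl min a = l'.foldl min a := by
  induction h generalizing a with
  | nil => rfl
  | cons x _ ih => simp [List.foldl_cons, ih]
  | swap x y l =>
      simp only [List.foldl_cons]
      rw [min_right_comm]
  | trans _ _ ih1 ih2 => rw [ih1, ih2]

theorem foldl_min_absorb (z : Int) (w : List Int) : (z :: w).foldl min z = w.foldl min z := by
  simp [List.foldl_cons]

theorem foldl_min_sorted_head (c : Int) (u : List Int)
    (hc : ∀ y ∈ u, c ≤ y) : u.foldl min c = c := by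
  induction u generalizing c with
  | nil => rfl
  | cons y ys ih =>
      simp only [List.foldl_cons]
      rw [min_eq_left (hc y (by simp))]
      exact ih c (fun z hz => hc z (by simp [hz]))

-- the minimum of any list permuting a sorted non-empty list is its head
theorem foldl_min_of_perm_sorted {xs : List Int} {c : Int} {u : List Int}
    (hperm : xs.Perm (c :: u)) (hsort : (c :: u).Pairwise (· ≤ ·))
    {z : Int} {w : List Int} (hxs : xs = z :: w) : w.foldl min z = c := by
  subst hxs
  have hz : c ≤ z := by
    have hm : z ∈ c :: u := hperm.mem_iff.mp (List.mem_cons_self ..)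
    rcases List.mem_cons.mp hm with h | h
    · omega
    · exact (List.pairwise_cons.mp hsort).1 z h
  calc w.foldl min z = (z :: w).foldl min z := (foldl_min_absorb z w).symm
    _ = (c :: u).foldl min z := foldl_min_perm hperm z
    _ = u.foldl min (min z c) := by simp [List.foldl_cons, min_comm]
    _ = u.foldl min c := by rw [min_eq_right hz]
    _ = c := foldl_min_sorted_head c u (List.pairwise_cons.mp hsort).1

theorem smallest_eq_foldl_min (x : Int) (t : List Int) :
    smallest (x :: t) = t.foldl min x := by
  have : (fun (m v : Int) => if v < m then v else m) = min := by
    funext m v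
    simp only [min_def]
    split <;> split <;> omega
  simp [smallest, this]

theorem popMin_eq (x : Int) (t : List Int) :
    popMin (x :: t) = (t.foldl min x, (x :: t).erase (t.foldl min x)) := by
  induction t generalizing x with
  | nil => simp [popMin]
  | cons y ys ih =>
      have hmin : (y :: ys).foldl min x = min x (ys.foldl min y) := by
        have : ∀ (l : List Int) (a b : Int), l.foldl min (min a b) = min a (l.foldl min b) := by
          intro l
          induction l with
          | nil => intro a b; rfl
          | cons z zs ihl =>
              intro a b
              simp only [List.foldl_cons]
              rw [min_assoc, ihl]
        simpa using this ys x y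
      simp only [popMin, ih y]
      split
      · rename_i hle
        have : min x (ys.foldl min y) = x := min_eq_left hle
        simp [hmin, this, List.erase_cons_head]
      · rename_i hgt
        have hm : min x (ys.foldl min y) = ys.foldl min y := min_eq_right (by omega)
        have hne : x ≠ ys.foldl min y := by omega
        simp [hmin, hm, List.erase_cons, hne]

-- main simulation: B's plain list is a permutation of A's sorted heap
theorem loop_eq (n : Nat) : ∀ (xs heap : List Int) (K ans : Int),
    xs.length = n → xs.Perm heap → heap.Pairwise (· ≤ ·) →
    altLoop xs K ans = heapLoop heap K ans := by
  induction n using Nat.strong_induction_on with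
  | _ n IH =>
    intro xs heap K ans hlen hperm hsort
    match heap with
    | [] =>
        have : xs = [] := List.Perm.eq_nil hperm
        subst this; simp [altLoop, heapLoop]
    | [a] =>
        rcases List.length_eq_one_iff.mp (by simpa using hperm.length_eq) with ⟨z, rfl⟩
        simp [altLoop, heapLoop]
    | a :: b :: rest =>
        have hlen2 : xs.length = rest.length + 2 := by simpa using hperm.length_eq
        match xs, hlen2 with
        | x :: y :: t, hlen2' =>
          -- first pop-min returns a, the heap minimum
          have hp : popMin (x :: y :: t) = ((y :: t).foldl min x, (x :: y :: t).erase ((y :: t).foldl min x)) :=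
            popMin_eq x (y :: t)
          have hm1 : (y :: t).foldl min x = a :=
            foldl_min_of_perm_sorted hperm hsort rfl
          have hperm1 : ((x :: y :: t).erase a).Perm (b :: rest) := by
            have := hperm.erase (a := a)
            simpa [List.erase_cons_head] using this
          have hsort1 : (b :: rest).Pairwise (· ≤ ·) := (List.pairwise_cons.mp hsort).2
          -- the erased list is non-empty: its length is t.length + 1
          have hlen1 : ((x :: y :: t).erase a).length = t.length + 1 := by
            have h1 := hperm1.length_eq
            simp at h1 hlen2' ⊢
            omega
          match he1 : (x :: y :: t).erase a, hlen1 with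
          | z :: w, hlen1' =>
            -- second pop-min returns b
            have hq : popMin (z :: w) = (w.foldl min z, (z :: w).erase (w.foldl min z)) := popMin_eq z w
            have hperm1' : (z :: w).Perm (b :: rest) := he1 ▸ hperm1
            have hm2 : w.foldl min z = b := foldl_min_of_perm_sorted hperm1' hsort1 rfl
            have hperm2 : ((z :: w).erase b).Perm rest := by
              have := hperm1'.erase (a := b)
              simpa [List.erase_cons_head] using this
            -- the rebuilt lists permute each other
            have hperm3 : (((z :: w).erase b) ++ [a + 2 * b]).Perm (heapPush (a + b * 2) rest) := by
              have h1 : (((z :: w).erase b) ++ [a + 2 * b]).Perm (rest ++ [a + 2 * b]) :=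
                hperm2.append_right _
            -- rest ++ [v] ~ v :: rest ~ heapPush v rest
              have h2 : (rest ++ [a + 2 * b]).Perm ((a + 2 * b) :: rest) :=
                List.perm_append_singleton _ _
              have h3 : ((a + 2 * b) :: rest).Perm (heapPush (a + b * 2) rest) := by
                have : a + 2 * b = a + b * 2 := by ring
                rw [this]
                exact (heapPush_perm _ _).symm
              exact (h1.trans h2).trans h3
            have hsort3 : (heapPush (a + b * 2) rest).Pairwise (· ≤ ·) :=
              heapPush_sorted _ _ (List.pairwise_cons.mp hsort1).2
            -- both sides take the same branch and produce the same value
            have hpushlen : (heapPush (a + b * 2) rest).length = rest.length + 1 :=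
              heapPush_length _ _
            match hh : heapPush (a + b * 2) rest, hpushlen with
            | c :: u, hpl =>
              have hsort3' : (c :: u).Pairwise (· ≤ ·) := hh ▸ hsort3
              have hperm3' : (((z :: w).erase b) ++ [a + 2 * b]).Perm (c :: u) := hh ▸ hperm3
              -- smallest of the rebuilt plain list = head of the rebuilt heap
              have hxs3len : (((z :: w).erase b) ++ [a + 2 * b]).length = rest.length + 1 := by
                have h1 := hperm3'.length_eq
                simp at h1 hpl ⊢
                omega
              have hsm : smallest (((z :: w).erase b) ++ [a + 2 * b]) = c := by
                match he3 : ((z :: w).erase b) ++ [a + 2 * b], hxs3len with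
                | s :: v, hx3 =>
                  rw [smallest_eq_foldl_min]
                  exact foldl_min_of_perm_sorted (he3 ▸ hperm3') hsort3' rfl
              -- unfold one step of each loop
              rw [altLoop, heapLoop]
              simp only [hp, hm1, he1, hq, hm2, hh, List.headI]
              by_cases hK : c ≥ K
              · simp [hsm, hK]
              · have hrec := IH (rest.length + 1) (by omega)
                  (((z :: w).erase b) ++ [a + 2 * b]) (c :: u) K (ans + 1)
                  hxs3len hperm3' hsort3'
                simp [hsm, hK, hrec]

theorem build_perm (l : List Int) : ∀ acc : List Int,
    (l.foldl (fun h i => heapPush i h) acc).Perm (acc ++ l) := by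
  induction l with
  | nil => intro acc; simp
  | cons y ys ih =>
      intro acc
      simp only [List.foldl_cons]
      refine (ih (heapPush y acc)).trans ?_
      have h1 : (heapPush y acc).Perm (acc ++ [y]) :=
        (heapPush_perm y acc).trans (List.perm_append_singleton y acc).symm
      have := h1.append_right ys
      simpa using this

theorem build_sorted (l : List Int) : ∀ acc : List Int, acc.Pairwise (· ≤ ·) →
    (l.foldl (fun h i => heapPush i h) acc).Pairwise (· ≤ ·) := by
  induction l with
  | nil => intro acc h; simpa
  | cons y ys ih => intro acc h; exact ih (heapPush y acc) (heapPush_sorted y acc h)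

-- ===== VERDICT (by name: the statement is the Claim_ definition above) =====
theorem solution_spec : Claim_equal_solution := by
  intro scoville K _
  unfold Spec_solution solution solution_alt
  exact (loop_eq scoville.length scoville _ K 0 rfl
    (by simpa using (build_perm scoville []).symm)
    (build_sorted scoville [] (by simp))).symm
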